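-- pv_equiv track=rewrite | github.com/pamparious/ai_portal_agent | thomson-reuters-ai-mcp/src/portal/response_parser.py | _is_user_message
-- ===== SOURCE A (Python) =====
-- def _is_user_message(text: str) -> bool:
--     """Check if text is likely a user message"""
--     text_lower = text.lower().strip()
--
--     # Check for question patterns
--     question_patterns = [
--         'what is', 'what are', 'how to', 'how do', 'why is', 'why are',
--         'where is', 'where are', 'when is', 'when are', 'who is', 'who are',
--         'can you', 'could you', 'would you', 'please'
--     ]
--
--     for pattern in question_patterns:
--         if pattern in text_lower:
--             return True
--
--     # Check if it ends with a question mark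
--     if text.strip().endswith('?'):
--         return True
--
--     return False
-- ===== SOURCE B (Python) =====
-- def _candidates(c):
--     if c == 'w':
--         return ('what is', 'what are', 'why is', 'why are', 'where is',
--                 'where are', 'when is', 'when are', 'who is', 'who are',
--                 'would you')
--     if c == 'h':
--         return ('how to', 'how do')
--     if c == 'c':
--         return ('can you', 'could you')
--     if c == 'p':
--         return ('please',)
--     return ()
--
--
-- def _is_user_message(text: str) -> bool:
--     """Check if text is likely a user message (single scan with first-char dispatch)."""
--     if text.strip().endswith('?'):
--         return True
--     t = text.lower().strip()
--     for i in range(len(t)):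
--         for p in _candidates(t[i]):
--             if t.startswith(p, i):
--                 return True
--     return False
-- ===== Notes on version B (the rewrite author's own statement) =====
-- stated objective: alternative
-- what changed: Replaces sixteen independent whole-string substring searches (one per phrase) by a single left-to-right scan of the normalized text that, at each position, dispatches on the current character to the few phrases that can start there and checks only those with startswith.
import Mathlib
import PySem

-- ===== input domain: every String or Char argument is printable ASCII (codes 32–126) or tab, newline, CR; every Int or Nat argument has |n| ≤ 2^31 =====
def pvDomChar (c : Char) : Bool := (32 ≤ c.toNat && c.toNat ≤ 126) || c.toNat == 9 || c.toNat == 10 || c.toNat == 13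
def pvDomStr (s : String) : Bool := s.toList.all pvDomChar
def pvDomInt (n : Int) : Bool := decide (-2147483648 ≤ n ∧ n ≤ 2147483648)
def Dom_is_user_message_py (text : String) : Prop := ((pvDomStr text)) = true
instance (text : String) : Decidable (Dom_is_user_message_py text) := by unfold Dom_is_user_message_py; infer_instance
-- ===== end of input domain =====

-- B replaces the sixteen separate 'pattern in text' substring searches by one
-- left-to-right scan that dispatches on the current character to the few
-- patterns that can start there (alternative decomposition, same result).

-- ===== PORT A =====
def pyQuestionPatterns : List String :=
  ["what is", "what are", "how to", "how do", "why is", "why are",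
   "where is", "where are", "when is", "when are", "who is", "who are",
   "can you", "could you", "would you", "please"]

def is_user_message_py (text : String) : Bool :=
  let text_lower := PySem.Str.strip (PySem.Str.lower text)
  -- 'for pattern in question_patterns: if pattern in text_lower: return True'
  if pyQuestionPatterns.any (fun pattern => PySem.Str.isIn pattern text_lower) then true
  else if PySem.Str.endswith (PySem.Str.strip text) "?" then true
  else false

-- ===== PORT B =====
def altCandidates (c : Char) : List String :=
  if c = 'w' then
    ["what is", "what are", "why is", "why are", "where is",
     "where are", "when is", "when are", "who is", "who are",
     "would you"]
  else if c = 'h' then ["how to", "how do"]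
  else if c = 'c' then ["can you", "could you"]
  else if c = 'p' then ["please"]
  else []

-- 'for i in range(len(t)): for p in _candidates(t[i]): if t.startswith(p, i): return True'
def altScan : List Char → Bool
  | [] => false
  | c :: rest =>
      (altCandidates c).any (fun p => PySem.Chars.startswith (c :: rest) p.toList)
      || altScan rest

def is_user_message_py_alt (text : String) : Bool :=
  if PySem.Str.endswith (PySem.Str.strip text) "?" then true
  else altScan (PySem.Str.strip (PySem.Str.lower text)).toList

-- ===== PRECONDITION & SPEC =====
def Spec_is_user_message_py (text : String) (out : Bool) : Prop := out = is_user_message_py_alt text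
instance (text : String) (out : Bool) : Decidable (Spec_is_user_message_py text out) := by unfold Spec_is_user_message_py; infer_instance

-- ===== CLAIM (what is proved, stated in full; the proofs are below) =====
def Claim_equal_is_user_message_py : Prop := ∀ (text : String), Dom_is_user_message_py text → Spec_is_user_message_py text (is_user_message_py text)

-- ===== LEMMAS AND PROOFS =====

lemma cand_sub (c : Char) (p : String) (hp : p ∈ altCandidates c) : p ∈ pyQuestionPatterns := by
  unfold altCandidates at hp
  split_ifs at hp <;> simp only [List.mem_cons, List.not_mem_nil] at hp <;>
    rcases hp with rfl | rfl | rfl | rfl | rfl | rfl | rfl | rfl | rfl | rfl | rfl | h <;>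
    simp_all [pyQuestionPatterns]

lemma dispatch_iff (c : Char) (rest : List Char) :
    ((altCandidates c).any (fun p => PySem.Chars.startswith (c :: rest) p.toList)) = true ↔
      ∃ p ∈ pyQuestionPatterns, p.toList <+: c :: rest := by
  simp only [List.any_eq_true, PySem.Chars.startswith_iff]
  constructor
  · rintro ⟨p, hp, hpre⟩
    exact ⟨p, cand_sub c p hp, hpre⟩
  · rintro ⟨p, hp, hpre⟩
    refine ⟨p, ?_, hpre⟩
    fin_cases hp <;>
      [ (have h := (List.cons_prefix_cons.mp (show 'w' :: "hat is".toList <+: c :: rest from hpre)).1);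
        (have h := (List.cons_prefix_cons.mp (show 'w' :: "hat are".toList <+: c :: rest from hpre)).1);
        (have h := (List.cons_prefix_cons.mp (show 'h' :: "ow to".toList <+: c :: rest from hpre)).1);
        (have h := (List.cons_prefix_cons.mp (show 'h' :: "ow do".toList <+: c :: rest from hpre)).1);
        (have h := (List.cons_prefix_cons.mp (show 'w' :: "hy is".toList <+: c :: rest from hpre)).1);
        (have h := (List.cons_prefix_cons.mp (show 'w' :: "hy are".toList <+: c :: rest from hpre)).1);
        (have h := (List.cons_prefix_cons.mp (show 'w' :: "here is".toList <+: c :: rest from hpre)).1);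
        (have h := (List.cons_prefix_cons.mp (show 'w' :: "here are".toList <+: c :: rest from hpre)).1);
        (have h := (List.cons_prefix_cons.mp (show 'w' :: "hen is".toList <+: c :: rest from hpre)).1);
        (have h := (List.cons_prefix_cons.mp (show 'w' :: "hen are".toList <+: c :: rest from hpre)).1);
        (have h := (List.cons_prefix_cons.mp (show 'w' :: "ho is".toList <+: c :: rest from hpre)).1);
        (have h := (List.cons_prefix_cons.mp (show 'w' :: "ho are".toList <+: c :: rest from hpre)).1);
        (have h := (List.cons_prefix_cons.mp (show 'c' :: "an you".toList <+: c :: rest from hpre)).1);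
        (have h := (List.cons_prefix_cons.mp (show 'c' :: "ould you".toList <+: c :: rest from hpre)).1);
        (have h := (List.cons_prefix_cons.mp (show 'w' :: "ould you".toList <+: c :: rest from hpre)).1);
        (have h := (List.cons_prefix_cons.mp (show 'p' :: "lease".toList <+: c :: rest from hpre)).1)] <;>
      subst h <;> simp [altCandidates]

lemma scan_iff (l : List Char) :
    altScan l = true ↔ ∃ p ∈ pyQuestionPatterns, p.toList <:+: l := by
  induction l with
  | nil =>
    simp only [altScan, Bool.false_eq_true, false_iff]
    decide
  | cons c rest ih =>
    show ((altCandidates c).any (fun p => PySem.Chars.startswith (c :: rest) p.toList)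
        || altScan rest) = true ↔ _
    simp only [Bool.or_eq_true, dispatch_iff, ih, List.infix_cons_iff]
    constructor
    · rintro (⟨p, hp, h⟩ | ⟨p, hp, h⟩)
      · exact ⟨p, hp, Or.inl h⟩
      · exact ⟨p, hp, Or.inr h⟩
    · rintro ⟨p, hp, h | h⟩
      · exact Or.inl ⟨p, hp, h⟩
      · exact Or.inr ⟨p, hp, h⟩

lemma scan_eq_any (s : String) :
    altScan s.toList = pyQuestionPatterns.any (fun p => PySem.Str.isIn p s) := by
  rw [Bool.eq_iff_iff, scan_iff]
  simp only [List.any_eq_true, PySem.Str.isIn_iff_infix]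

-- ===== VERDICT (by name: the statement is the Claim_ definition above) =====
theorem is_user_message_py_spec : Claim_equal_is_user_message_py := by
  intro text _
  unfold Spec_is_user_message_py is_user_message_py is_user_message_py_alt
  rw [scan_eq_any]
  split_ifs <;> simp_all
  rw [Bool.eq_iff_iff]; simp [List.any_eq_true]
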